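-- pv_equiv track=rewrite | github.com/Baker-Data-Science/ergm-ensemble-embedding | featurize.py | parse_dotbracket
-- ===== SOURCE A (Python) =====
-- from typing import List, Tuple, Dict, Set
--
-- def parse_dotbracket(dotbracket: str) -> List[Tuple[int, int]]:
--     """Parses a dot-bracket notation string into a list of pairs (i, j)."""
--     stack = []
--     pairs = []
--     for i, c in enumerate(dotbracket):
--         if c == '(':
--             stack.append(i)
--         elif c == ')':
--             j = stack.pop()
--             pairs.append((j, i))
--     return sorted(pairs)
-- ===== SOURCE B (Python) =====
-- def parse_dotbracket(dotbracket):
--     """Parses a dot-bracket notation string into a list of pairs (i, j)."""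
--     n = len(dotbracket)
--
--     def seq(i):
--         # parse from position i up to the first unconsumed ')' (or the end of
--         # the string); returns (pairs, stop), pairs already ordered by opening index
--         pairs = []
--         while i < n:
--             c = dotbracket[i]
--             if c == '(':
--                 inner, j = seq(i + 1)
--                 if j < n:            # dotbracket[j] == ')': it closes this '('
--                     pairs.append((i, j))
--                     pairs.extend(inner)
--                     i = j + 1
--                 else:                # ran off the end: this '(' is unmatched
--                     pairs.extend(inner)
--                     i = j
--             elif c == ')':
--                 break
--             else:
--                 i += 1
--         return pairs, i
--
--     return seq(0)[0]
-- ===== Notes on version B (the rewrite author's own statement) =====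
-- stated objective: alternative
-- what changed: B replaces A's stack-machine-plus-final-sort by a recursive-descent parser (a recursion that follows the nesting structure of the string) that emits each pair before the pairs nested inside it, so the output is produced already ordered by opening index and there is no stack and no sort.
import Mathlib
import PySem

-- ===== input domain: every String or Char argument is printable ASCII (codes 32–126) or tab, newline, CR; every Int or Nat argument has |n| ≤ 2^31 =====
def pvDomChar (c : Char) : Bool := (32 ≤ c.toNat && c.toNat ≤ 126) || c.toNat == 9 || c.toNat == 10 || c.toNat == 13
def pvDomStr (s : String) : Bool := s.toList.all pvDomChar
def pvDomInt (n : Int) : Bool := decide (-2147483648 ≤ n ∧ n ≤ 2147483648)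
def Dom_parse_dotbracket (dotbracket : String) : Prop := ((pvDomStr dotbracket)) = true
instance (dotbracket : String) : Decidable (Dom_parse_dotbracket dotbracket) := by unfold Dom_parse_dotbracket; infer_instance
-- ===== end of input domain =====

-- B parses by recursive descent over the nesting structure (no stack, no dict), emitting each
-- pair before its nested pairs, so the result comes out ordered by opening index and A's final
-- sort disappears.


-- ===== PORT A =====
-- one loop iteration of A: push on '(', pop-and-record on ')'; none = IndexError (stack.pop() on empty)
def pvStepA (st : Option (List Int × List (Int × Int))) (p : Int × Char) :
    Option (List Int × List (Int × Int)) :=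
  match st with
  | none => none
  | some (stack, pairs) =>
    if p.2 = '(' then some (p.1 :: stack, pairs)
    else if p.2 = ')' then
      match stack with
      | [] => none
      | j :: rest => some (rest, pairs ++ [(j, p.1)])
    else some (stack, pairs)

def parse_dotbracket (dotbracket : String) : List (Int × Int) :=
  match (PySem.List.enumerate dotbracket.toList 0).foldl pvStepA (some ([], [])) with
  | none => []   -- unreachable under Pre_ (Python raises IndexError here)
  | some (_, pairs) => PySem.List.sorted2 pairs (fun q => q.1) (fun q => q.2)

-- ===== PORT B =====
-- Source B's inner function seq(i): parse from position i up to the first unconsumed ')' or the end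
-- of the string, returning (pairs ordered by opening index, stop position).  The while loop and
-- the recursive call become one structural recursion on a fuel counter (fuel = length + 1 always
-- suffices; otherwise the port is step for step Source B's code).
def pvSeq (s : List Char) : Nat → Nat → (List (Int × Int)) × Nat
  | 0, i => ([], i)
  | fuel+1, i =>
    if i < s.length then
      if s[i]! = '(' then
        let r := pvSeq s fuel (i+1)                 -- inner, j = seq(i + 1)
        if r.2 < s.length then                       -- dotbracket[j] == ')': it closes this '('
          let r2 := pvSeq s fuel (r.2+1)             -- rest of the while loop from j + 1
          (((i : Int), (r.2 : Int)) :: r.1 ++ r2.1, r2.2)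
        else r                                       -- ran off the end: this '(' is unmatched
      else if s[i]! = ')' then ([], i)               -- break
      else pvSeq s fuel (i+1)                        -- other character: i += 1
    else ([], i)

def parse_dotbracket_alt (dotbracket : String) : List (Int × Int) :=
  (pvSeq dotbracket.toList (dotbracket.toList.length + 1) 0).1   -- return seq(0)[0]

-- ===== PRECONDITION & SPEC =====
-- Pre_ excludes exactly the strings with an unmatched ')' (more ')' than '(' in some prefix),
-- on which A's stack.pop() raises IndexError.
def Pre_parse_dotbracket (dotbracket : String) : Prop :=
  ∀ n ∈ List.range (dotbracket.toList.length + 1),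
    (dotbracket.toList.take n).count ')' ≤ (dotbracket.toList.take n).count '('
instance (dotbracket : String) : Decidable (Pre_parse_dotbracket dotbracket) := by
  unfold Pre_parse_dotbracket; infer_instance

def pvWitness_parse_dotbracket : String := "((.))"

def Spec_parse_dotbracket (dotbracket : String) (out : List (Int × Int)) : Prop :=
  out = parse_dotbracket_alt dotbracket
instance (dotbracket : String) (out : List (Int × Int)) : Decidable (Spec_parse_dotbracket dotbracket out) := by
  unfold Spec_parse_dotbracket; infer_instance

-- ===== CLAIM (what is proved, stated in full; the proofs are below) =====
def Claim_equal_parse_dotbracket : Prop :=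
  ∀ (dotbracket : String), Dom_parse_dotbracket dotbracket → Pre_parse_dotbracket dotbracket →
    Spec_parse_dotbracket dotbracket (parse_dotbracket dotbracket)

-- ===== LEMMAS AND PROOFS =====

-- the enumerated suffix of the string from position i, as A's loop sees it
def pvEnum (l : List Char) (i : Nat) : List (Int × Char) :=
  PySem.List.enumerate (l.drop i) (i : Int)

theorem pvEnum_cons (l : List Char) (i : Nat) (h : i < l.length) :
    pvEnum l i = ((i : Int), l[i]) :: pvEnum l (i+1) := by
  unfold pvEnum
  rw [List.drop_eq_getElem_cons h, PySem.List.enumerate_cons]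
  norm_num

theorem pvEnum_end (l : List Char) (i : Nat) (h : l.length ≤ i) :
    pvEnum l i = [] := by
  unfold pvEnum
  rw [List.drop_eq_nil_of_le h, PySem.List.enumerate_nil]

theorem pvFoldA_none (l : List (Int × Char)) : l.foldl pvStepA none = none := by
  induction l with
  | nil => rfl
  | cons p l ih => simpa [pvStepA] using ih

-- stop position of pvSeq: ≥ i, ≤ length, and a ')' when it is inside the string
theorem pvSeq_bounds (s : List Char) :
    ∀ (fuel i : Nat), s.length ≤ i + fuel → i ≤ s.length →
      i ≤ (pvSeq s fuel i).2 ∧ (pvSeq s fuel i).2 ≤ s.length ∧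
        ((pvSeq s fuel i).2 < s.length → s[(pvSeq s fuel i).2]! = ')') := by
  intro fuel
  induction fuel with
  | zero =>
    intro i h1 h2
    simp only [pvSeq]
    exact ⟨le_refl i, h2, fun h => absurd h (by omega)⟩
  | succ fuel ih =>
    intro i h1 h2
    by_cases hi : i < s.length
    · simp only [pvSeq, if_pos hi]
      by_cases hop : s[i]! = '('
      · rw [if_pos hop]
        have IH1 := ih (i+1) (by omega) (by omega)
        by_cases hj : (pvSeq s fuel (i+1)).2 < s.length
        · rw [if_pos hj]
          have IH2 := ih ((pvSeq s fuel (i+1)).2 + 1) (by omega) (by omega)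
          exact ⟨by omega, IH2.2.1, IH2.2.2⟩
        · rw [if_neg hj]
          exact ⟨by omega, IH1.2.1, IH1.2.2⟩
      · rw [if_neg hop]
        by_cases hcl : s[i]! = ')'
        · rw [if_pos hcl]
          exact ⟨le_refl i, h2, fun _ => hcl⟩
        · rw [if_neg hcl]
          have IH1 := ih (i+1) (by omega) (by omega)
          exact ⟨by omega, IH1.2.1, IH1.2.2⟩
    · simp only [pvSeq, if_neg hi]
      exact ⟨le_refl i, h2, fun h => absurd h hi⟩

-- the pairs of pvSeq: strictly increasing opening indices, all in [i, stop)
theorem pvSeq_pairs (s : List Char) :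
    ∀ (fuel i : Nat), s.length ≤ i + fuel → i ≤ s.length →
      (pvSeq s fuel i).1.Pairwise (fun a b => a.1 < b.1) ∧
      ∀ p ∈ (pvSeq s fuel i).1, (i : Int) ≤ p.1 ∧ p.1 < ((pvSeq s fuel i).2 : Int) := by
  intro fuel
  induction fuel with
  | zero =>
    intro i _ _
    simp [pvSeq]
  | succ fuel ih =>
    intro i h1 h2
    by_cases hi : i < s.length
    · simp only [pvSeq, if_pos hi]
      by_cases hop : s[i]! = '('
      · rw [if_pos hop]
        obtain ⟨hj1, hj2, _⟩ := pvSeq_bounds s fuel (i+1) (by omega) (by omega)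
        obtain ⟨hpw1, hb1⟩ := ih (i+1) (by omega) (by omega)
        by_cases hj : (pvSeq s fuel (i+1)).2 < s.length
        · rw [if_pos hj]
          obtain ⟨hk1, hk2, _⟩ := pvSeq_bounds s fuel ((pvSeq s fuel (i+1)).2 + 1) (by omega) (by omega)
          obtain ⟨hpw2, hb2⟩ := ih ((pvSeq s fuel (i+1)).2 + 1) (by omega) (by omega)
          constructor
          · refine List.pairwise_cons.mpr ⟨?_, List.pairwise_append.mpr ⟨hpw1, hpw2, ?_⟩⟩
            · intro q hq
              rcases List.mem_append.mp hq with h | h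
              · have := (hb1 q h).1; simp only []; omega
              · have := (hb2 q h).1; simp only []; omega
            · intro a ha b hb
              have h1' := (hb1 a ha).2
              have h2' := (hb2 b hb).1
              omega
          · intro p hp
            rcases List.mem_cons.mp hp with h | h
            · subst h
              refine ⟨by simp, ?_⟩
              omega
            · rcases List.mem_append.mp h with h' | h'
              · have := hb1 p h'
                constructor <;> omega
              · have := hb2 p h'
                constructor <;> omega
        · rw [if_neg hj]
          refine ⟨hpw1, fun p hp => ?_⟩
          have := hb1 p hp
          constructor <;> omega
      · rw [if_neg hop]
        by_cases hcl : s[i]! = ')'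
        · rw [if_pos hcl]; simp
        · rw [if_neg hcl]
          obtain ⟨hj1, hj2, _⟩ := pvSeq_bounds s fuel (i+1) (by omega) (by omega)
          obtain ⟨hpw1, hb1⟩ := ih (i+1) (by omega) (by omega)
          refine ⟨hpw1, fun p hp => ?_⟩
          have := hb1 p hp
          constructor <;> omega
    · simp [pvSeq, if_neg hi]

-- main simulation: A's fold over the suffix from i reaches position (pvSeq …).2 with stack
-- unchanged and the pairs of pvSeq appended (in some order)
theorem pvMain (l : List Char) :
    ∀ (fuel i : Nat) (st : List Int) (acc : List (Int × Int)),
      l.length ≤ i + fuel → i ≤ l.length →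
      ∃ st' acc', acc'.Perm (acc ++ (pvSeq l fuel i).1) ∧
        (pvEnum l i).foldl pvStepA (some (st, acc)) =
          (if (pvSeq l fuel i).2 < l.length
           then (pvEnum l (pvSeq l fuel i).2).foldl pvStepA (some (st, acc'))
           else some (st', acc')) := by
  intro fuel
  induction fuel with
  | zero =>
    intro i st acc h1 h2
    refine ⟨st, acc, by simp [pvSeq], ?_⟩
    simp only [pvSeq]
    rw [pvEnum_end l i (by omega), if_neg (by omega)]
    simp
  | succ fuel ih =>
    intro i st acc h1 h2
    by_cases hi : i < l.length
    · have hc := pvEnum_cons l i hi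
      by_cases hop : l[i]! = '('
      · -- '(' : push i, recurse
        have hgi : l[i] = '(' := by rw [← getElem!_pos l i hi]; exact hop
        have hstep : (pvEnum l i).foldl pvStepA (some (st, acc)) =
            (pvEnum l (i+1)).foldl pvStepA (some ((i : Int) :: st, acc)) := by
          rw [hc, List.foldl_cons]
          simp [pvStepA, hgi]
        obtain ⟨st1, acc1, hperm1, hfold1⟩ := ih (i+1) ((i : Int) :: st) acc (by omega) (by omega)
        obtain ⟨hj1, hj2, hj3⟩ := pvSeq_bounds l fuel (i+1) (by omega) (by omega)
        simp only [pvSeq, if_pos hi, if_pos hop]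
        by_cases hj : (pvSeq l fuel (i+1)).2 < l.length
        · rw [if_pos hj]
          have hgj : l[(pvSeq l fuel (i+1)).2] = ')' := by
            rw [← getElem!_pos l _ hj]; exact hj3 hj
          have hstep2 : (pvEnum l (pvSeq l fuel (i+1)).2).foldl pvStepA
              (some ((i : Int) :: st, acc1)) =
              (pvEnum l ((pvSeq l fuel (i+1)).2 + 1)).foldl pvStepA
                (some (st, acc1 ++ [((i : Int), ((pvSeq l fuel (i+1)).2 : Int))])) := by
            rw [pvEnum_cons l _ hj, List.foldl_cons]
            simp [pvStepA, hgj]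
          obtain ⟨st2, acc2, hperm2, hfold2⟩ :=
            ih ((pvSeq l fuel (i+1)).2 + 1) st
              (acc1 ++ [((i : Int), ((pvSeq l fuel (i+1)).2 : Int))]) (by omega) (by omega)
          refine ⟨st2, acc2, ?_, ?_⟩
          · -- permutation juggling
            have e1 : (acc1 ++ [((i : Int), ((pvSeq l fuel (i+1)).2 : Int))]) ++
                (pvSeq l fuel ((pvSeq l fuel (i+1)).2 + 1)).1 |>.Perm
                (((acc ++ (pvSeq l fuel (i+1)).1) ++
                  [((i : Int), ((pvSeq l fuel (i+1)).2 : Int))]) ++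
                  (pvSeq l fuel ((pvSeq l fuel (i+1)).2 + 1)).1) :=
              (hperm1.append_right _).append_right _
            have e3 : ((pvSeq l fuel (i+1)).1 ++
                [((i : Int), ((pvSeq l fuel (i+1)).2 : Int))]) ++
                (pvSeq l fuel ((pvSeq l fuel (i+1)).2 + 1)).1 |>.Perm
                ((((i : Int), ((pvSeq l fuel (i+1)).2 : Int)) :: (pvSeq l fuel (i+1)).1) ++
                  (pvSeq l fuel ((pvSeq l fuel (i+1)).2 + 1)).1) :=
              (List.perm_append_singleton _ _).append_right _
            refine (hperm2.trans (e1.trans ?_))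
            have e2 : ((acc ++ (pvSeq l fuel (i+1)).1) ++
                [((i : Int), ((pvSeq l fuel (i+1)).2 : Int))]) ++
                (pvSeq l fuel ((pvSeq l fuel (i+1)).2 + 1)).1 =
                acc ++ (((pvSeq l fuel (i+1)).1 ++
                  [((i : Int), ((pvSeq l fuel (i+1)).2 : Int))]) ++
                  (pvSeq l fuel ((pvSeq l fuel (i+1)).2 + 1)).1) := by
              simp [List.append_assoc]
            rw [e2]
            simpa using e3.append_left acc
          · rw [hstep, hfold1, if_pos hj, hstep2, hfold2]
        · rw [if_neg hj]
          refine ⟨st1, acc1, hperm1, ?_⟩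
          rw [if_neg hj, hstep, hfold1, if_neg hj]
      · by_cases hcl : l[i]! = ')'
        · -- ')' : stop here
          simp only [pvSeq, if_pos hi, if_neg hop, if_pos hcl]
          exact ⟨st, acc, by simp, rfl⟩
        · -- other character: skip
          have hgo : ¬ l[i] = '(' := by rw [← getElem!_pos l i hi]; exact hop
          have hgc : ¬ l[i] = ')' := by rw [← getElem!_pos l i hi]; exact hcl
          have hstep : (pvEnum l i).foldl pvStepA (some (st, acc)) =
              (pvEnum l (i+1)).foldl pvStepA (some (st, acc)) := by
            rw [hc, List.foldl_cons]
            simp [pvStepA, hgo, hgc]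
          simp only [pvSeq, if_pos hi, if_neg hop, if_neg hcl]
          obtain ⟨st1, acc1, hperm1, hfold1⟩ := ih (i+1) st acc (by omega) (by omega)
          exact ⟨st1, acc1, hperm1, by rw [hstep, hfold1]⟩
    · refine ⟨st, acc, by simp [pvSeq, if_neg hi], ?_⟩
      simp only [pvSeq, if_neg hi]
      rw [pvEnum_end l i (by omega)]
      simp

-- under the prefix-count condition the stack never underflows, so A's fold succeeds
theorem pvSome (l : List (Int × Char)) :
    ∀ (stack : List Int) (pairs : List (Int × Int)),
      (∀ n ≤ l.length,
        ((l.map Prod.snd).take n).count ')' ≤ stack.length + ((l.map Prod.snd).take n).count '(') →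
      ∃ r, l.foldl pvStepA (some (stack, pairs)) = some r := by
  induction l with
  | nil => intro stack pairs _; exact ⟨(stack, pairs), rfl⟩
  | cons p l ih =>
    intro stack pairs h
    by_cases hop : p.2 = '('
    · have hA : pvStepA (some (stack, pairs)) p = some (p.1 :: stack, pairs) := by
        simp [pvStepA, hop]
      obtain ⟨r, hr⟩ := ih (p.1 :: stack) pairs (by
        intro n hn
        have := h (n + 1) (by simpa using hn)
        simp only [List.map_cons, List.take_succ_cons, List.count_cons, hop] at this
        simp only [List.length_cons]
        simp at this
        omega)
      exact ⟨r, by simp only [List.foldl_cons, hA]; exact hr⟩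
    · by_cases hcl : p.2 = ')'
      · have h1 := h 1 (by simp)
        simp only [List.map_cons, List.take_succ_cons, List.take_zero, List.count_cons,
          List.count_nil, hcl] at h1
        cases stack with
        | nil => exfalso; simp at h1
        | cons j rest =>
          have hA : pvStepA (some (j :: rest, pairs)) p = some (rest, pairs ++ [(j, p.1)]) := by
            simp [pvStepA, hcl]
          obtain ⟨r, hr⟩ := ih rest (pairs ++ [(j, p.1)]) (by
            intro n hn
            have := h (n + 1) (by simpa using hn)
            simp only [List.map_cons, List.take_succ_cons, List.count_cons, hcl,
              List.length_cons] at this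
            simp at this
            omega)
          exact ⟨r, by simp only [List.foldl_cons, hA]; exact hr⟩
      · have hA : pvStepA (some (stack, pairs)) p = some (stack, pairs) := by
          simp [pvStepA, hop, hcl]
        obtain ⟨r, hr⟩ := ih stack pairs (by
          intro n hn
          have := h (n + 1) (by simpa using hn)
          simpa [hop, hcl, List.count_cons] using this)
        exact ⟨r, by simp only [List.foldl_cons, hA]; exact hr⟩

-- insertBy with two comparison functions that agree on the inserted element vs the list
theorem pvInsertBy_congr {α : Type} (b1 b2 : α → α → Bool) :
    ∀ (ys : List α) (x : α), (∀ y ∈ ys, b1 x y = b2 x y) →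
      PySem.List.insertBy b1 x ys = PySem.List.insertBy b2 x ys := by
  intro ys
  induction ys with
  | nil => intro x _; rfl
  | cons y ys ih =>
    intro x h
    have hy := h y (List.mem_cons_self ..)
    simp only [PySem.List.insertBy, hy]
    by_cases hb : b2 x y = true
    · simp [hb]
    · simp only [hb, if_neg, Bool.not_eq_true]
      rw [ih x (fun z hz => h z (List.mem_cons_of_mem _ hz))]

theorem pvFoldlInsertBy_congr {α : Type} (b1 b2 : α → α → Bool) (S : List α)
    (hS : ∀ a ∈ S, ∀ b ∈ S, b1 a b = b2 a b) :
    ∀ (xs acc : List α), (∀ x ∈ xs, x ∈ S) → (∀ y ∈ acc, y ∈ S) →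
      xs.foldl (fun acc x => PySem.List.insertBy b1 x acc) acc =
      xs.foldl (fun acc x => PySem.List.insertBy b2 x acc) acc := by
  intro xs
  induction xs with
  | nil => intro acc _ _; rfl
  | cons x xs ih =>
    intro acc hxs hacc
    have hx : x ∈ S := hxs x (List.mem_cons_self ..)
    have hcong : PySem.List.insertBy b1 x acc = PySem.List.insertBy b2 x acc :=
      pvInsertBy_congr b1 b2 acc x (fun y hy => hS x hx y (hacc y hy))
    simp only [List.foldl_cons, hcong]
    exact ih (PySem.List.insertBy b2 x acc)
      (fun z hz => hxs z (List.mem_cons_of_mem _ hz))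
      (fun y hy => by
        rcases (PySem.List.mem_insertBy b2 x y acc).mp hy with h | h
        · exact h ▸ hx
        · exact hacc y h)

-- on a list whose first components determine the element, Python's tuple sort is the sort by fst
theorem pvSorted2_eq_sorted_fst (P : List (Int × Int))
    (hinj : ∀ a ∈ P, ∀ b ∈ P, a.1 = b.1 → a = b) :
    PySem.List.sorted2 P (fun q => q.1) (fun q => q.2) =
    PySem.List.sorted P (fun q => q.1) := by
  rw [PySem.List.sorted_eq_foldl_insertBy]
  show List.foldl (fun acc x => PySem.List.insertBy _ x acc) [] P = _
  refine (pvFoldlInsertBy_congr _ _ P ?_ P [] (fun x hx => hx) (by simp)).symm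
  intro a ha b hb
  by_cases h1 : a.1 < b.1
  · simp [h1]
  · by_cases h2 : b.1 < a.1
    · simp [h1, h2]
    · have heq : a = b := hinj a ha b hb (le_antisymm (not_lt.mp h2) (not_lt.mp h1))
      subst heq
      simp

-- ===== VERDICT (by name: the statement is the Claim_ definition above) =====
theorem parse_dotbracket_spec : Claim_equal_parse_dotbracket := by
  intro s _ hpre
  unfold Spec_parse_dotbracket
  set l := s.toList with hl
  have h0len : (0:Nat) ≤ l.length := Nat.zero_le _
  have hfuel : l.length ≤ 0 + (l.length + 1) := by omega
  obtain ⟨st', acc', hperm, hfold⟩ := pvMain l (l.length + 1) 0 [] [] hfuel h0len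
  obtain ⟨hk1, hk2, hk3⟩ := pvSeq_bounds l (l.length + 1) 0 hfuel h0len
  obtain ⟨hpw, _⟩ := pvSeq_pairs l (l.length + 1) 0 hfuel h0len
  have henum0 : pvEnum l 0 = PySem.List.enumerate l 0 := by
    unfold pvEnum; norm_num
  -- A's fold over the whole string succeeds under Pre_
  have hcount : ∀ n ≤ (PySem.List.enumerate l 0).length,
      (((PySem.List.enumerate l 0).map Prod.snd).take n).count ')' ≤
        (0:Nat) + (((PySem.List.enumerate l 0).map Prod.snd).take n).count '(' := by
    intro n hn
    have hmap : (PySem.List.enumerate l 0).map Prod.snd = l := PySem.List.map_snd_enumerate l 0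
    rw [hmap]
    have hn' : n ∈ List.range (l.length + 1) := by
      rw [List.mem_range]
      have : (PySem.List.enumerate l 0).length = l.length := PySem.List.length_enumerate l 0
      omega
    simpa using hpre n hn'
  obtain ⟨r, hr⟩ := pvSome (PySem.List.enumerate l 0) [] [] hcount
  -- the stop position must be the end of the string
  have hstop : ¬ (pvSeq l (l.length + 1) 0).2 < l.length := by
    intro hlt
    have hch : l[(pvSeq l (l.length + 1) 0).2] = ')' := by
      rw [← getElem!_pos l _ hlt]; exact hk3 hlt
    rw [← henum0, hfold, if_pos hlt, pvEnum_cons l _ hlt, List.foldl_cons] at hr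
    have : pvStepA (some ([], acc')) (((pvSeq l (l.length + 1) 0).2 : Int),
        l[(pvSeq l (l.length + 1) 0).2]) = none := by
      simp [pvStepA, hch]
    rw [this, pvFoldA_none] at hr
    exact absurd hr (by simp)
  rw [henum0] at hfold
  rw [hfold, if_neg hstop] at hr
  -- compute both sides
  unfold parse_dotbracket parse_dotbracket_alt
  rw [← hl, hfold, if_neg hstop]
  have hperm' : acc'.Perm (pvSeq l (l.length + 1) 0).1 := by simpa using hperm
  have hndfst : ((pvSeq l (l.length + 1) 0).1.map Prod.fst).Nodup :=
    List.pairwise_map.mpr (hpw.imp (fun h => ne_of_lt h))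
  have hnd' : (acc'.map Prod.fst).Nodup := by
    exact (hperm'.map Prod.fst).nodup_iff.mpr hndfst
  have hinj : ∀ a ∈ acc', ∀ b ∈ acc', a.1 = b.1 → a = b :=
    fun a ha b hb => List.inj_on_of_nodup_map hnd' ha hb
  show PySem.List.sorted2 acc' (fun q => q.1) (fun q => q.2) = _
  rw [pvSorted2_eq_sorted_fst acc' hinj]
  exact PySem.List.sorted_eq_of_perm_of_pairwise_lt acc' (pvSeq l (l.length + 1) 0).1
    (fun q => q.1) hperm'.symm hpw
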